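-- pv_equiv track=rewrite | github.com/fxmarty/binance-listing-announcement-price-analysis | lib/tbx_data_utils.py | next_non_nan
-- ===== SOURCE A (Python) =====
-- def next_non_nan(index, data):
--     """
--     Get the next non_nan index for a given index in an OHLCV list,
--     where the outputs consider that the NaN rows will be removed
--
--     Sets index to None if no non-NaN row is found
--     """
--
--     n = len(data)
--     n_nan = 0
--     res_index = None
--     for i in range(n):
--         if data[i][5] == 0:
--             n_nan += 1
--
--         if data[i][5] > 0 and i >= index:
--             res_index = i - n_nan
--             break
--
--     return res_index
-- ===== SOURCE B (Python) =====
-- def next_non_nan(index, data):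
--     # Two separate passes: find the first valid row at/after index, then
--     # count the NaN rows strictly before it.
--     first = None
--     for i, row in enumerate(data):
--         if row[5] > 0 and i >= index:
--             first = i
--             break
--     if first is None:
--         return None
--     return first - sum(1 for j in range(first) if data[j][5] == 0)
-- ===== Notes on version B (the rewrite author's own statement) =====
-- stated objective: simpler
-- what changed: Replaces A's single interleaved loop (counting NaNs while searching, with an accumulator) by two separate shaped passes: a plain search for the first valid row, then a generator-sum counting the NaN rows before it.
import Mathlib
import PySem

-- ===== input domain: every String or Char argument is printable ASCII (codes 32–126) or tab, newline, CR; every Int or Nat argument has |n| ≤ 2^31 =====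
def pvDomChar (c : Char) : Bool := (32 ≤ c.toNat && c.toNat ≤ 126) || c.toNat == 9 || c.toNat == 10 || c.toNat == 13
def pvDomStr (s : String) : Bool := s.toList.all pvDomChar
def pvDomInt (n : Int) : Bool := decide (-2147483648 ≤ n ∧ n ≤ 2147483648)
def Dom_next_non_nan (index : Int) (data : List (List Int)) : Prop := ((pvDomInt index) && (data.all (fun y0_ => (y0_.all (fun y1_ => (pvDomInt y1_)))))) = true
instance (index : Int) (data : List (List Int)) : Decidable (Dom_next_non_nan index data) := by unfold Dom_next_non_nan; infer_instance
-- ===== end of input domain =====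

-- B replaces A's single interleaved counting-and-searching loop by two separate passes
-- (find the first valid row, then count NaN rows before it); equal return value proved on Pre_.

-- ===== PORT A =====
-- A's for-loop over range(n): recursion over the remaining rows carrying i and the n_nan
-- accumulator; data[i][5] via pyGet? (none = IndexError, outside Pre_).
def nnGoA (index : Int) (i : Nat) (n_nan : Int) : List (List Int) → Option Int
  | [] => none
  | row :: rest =>
    match PySem.List.pyGet? row 5 with
    | none => none
    | some v =>
      let n_nan' := if v = 0 then n_nan + 1 else n_nan
      if 0 < v ∧ index ≤ (i : Int) then some ((i : Int) - n_nan')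
      else nnGoA index (i + 1) n_nan' rest

def next_non_nan (index : Int) (data : List (List Int)) : Option Int :=
  nnGoA index 0 0 data

-- ===== PORT B =====
-- first pass: first i ≥ index with data[i][5] > 0 (some none = not found, none = IndexError)
def altFind (index : Int) (i : Nat) : List (List Int) → Option (Option Nat)
  | [] => some none
  | row :: rest =>
    match PySem.List.pyGet? row 5 with
    | none => none
    | some v =>
      if 0 < v ∧ index ≤ (i : Int) then some (some i) else altFind index (i + 1) rest

-- second pass: sum(1 for j in range(first) if data[j][5] == 0)
def altCount (data : List (List Int)) (first : Nat) : Nat :=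
  ((List.range first).filter (fun j => PySem.List.pyGet? (data.getD j []) 5 == some 0)).length

def next_non_nan_alt (index : Int) (data : List (List Int)) : Option Int :=
  match altFind index 0 data with
  | none => none
  | some none => none
  | some (some first) => some ((first : Int) - (altCount data first : Int))

-- ===== PRECONDITION & SPEC =====
-- Pre_ excludes exactly the inputs where the Python A raises IndexError: a row shorter than
-- 6 entries that is reached before the loop breaks (i.e. with no valid break row before it).
def Pre_next_non_nan (index : Int) (data : List (List Int)) : Prop :=
  ∀ i, i < data.length → (data.getD i []).length < 6 →
    ∃ j, j < i ∧ 5 < (data.getD j []).length ∧ 0 < (data.getD j []).getD 5 0 ∧ index ≤ (j : Int)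
instance (index : Int) (data : List (List Int)) : Decidable (Pre_next_non_nan index data) := by
  unfold Pre_next_non_nan; infer_instance

def pvWitness_next_non_nan : Int × List (List Int) := (0, [[7,7,7,7,7,7]])

def Spec_next_non_nan (index : Int) (data : List (List Int)) (out : Option Int) : Prop := out = next_non_nan_alt index data
instance (index : Int) (data : List (List Int)) (out : Option Int) : Decidable (Spec_next_non_nan index data out) := by unfold Spec_next_non_nan; infer_instance

-- ===== CLAIM (what is proved, stated in full; the proofs are below) =====
def Claim_equal_next_non_nan : Prop := ∀ (index : Int) (data : List (List Int)), Dom_next_non_nan index data → Pre_next_non_nan index data → Spec_next_non_nan index data (next_non_nan index data)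

-- ===== LEMMAS AND PROOFS =====

lemma altCount_succ (data : List (List Int)) (i : Nat) :
    altCount data (i + 1) =
      altCount data i + (if PySem.List.pyGet? (data.getD i []) 5 == some 0 then 1 else 0) := by
  simp only [altCount, List.range_succ, List.filter_append, List.length_append]
  split <;> simp_all

-- Main loop correspondence; in fact the two ports agree on every input (the crash cases of
-- the Python programs are mapped to `none` by both ports identically).
lemma go_eq (index : Int) (data : List (List Int)) :
    ∀ (i : Nat), nnGoA index i (altCount data i) (data.drop i)
      = match altFind index i (data.drop i) with
        | none => none
        | some none => none
        | some (some first) => some ((first : Int) - (altCount data first : Int)) := by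
  intro i
  by_cases h : i < data.length
  case neg =>
    rw [List.drop_eq_nil_of_le (by omega)]
    simp [nnGoA, altFind]
  case pos =>
    have hdrop : data.drop i = data[i] :: data.drop (i + 1) :=
      List.drop_eq_getElem_cons h
    have hrow : data.getD i [] = data[i] := by
      simp [List.getD, List.getElem?_eq_getElem h]
    rw [hdrop]
    simp only [nnGoA, altFind]
    cases hg : PySem.List.pyGet? data[i] 5 with
    | none =>
      simp
    | some v =>
      simp only []
      have hcnt : (altCount data (i + 1) : Int)
          = (if v = 0 then (altCount data i : Int) + 1 else (altCount data i : Int)) := by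
        rw [altCount_succ, hrow, hg]
        by_cases hv : v = 0 <;> simp [hv]
      by_cases hb : 0 < v ∧ index ≤ (i : Int)
      · have hv0 : ¬ (v = 0) := by intro h0; omega
        simp [hb, hv0]
      · have ih := go_eq index data (i + 1)
        rw [if_neg hb, if_neg hb, ← hcnt] at *
        exact ih
termination_by i => data.length - i
decreasing_by omega

lemma ports_agree (index : Int) (data : List (List Int)) :
    next_non_nan index data = next_non_nan_alt index data := by
  have h := go_eq index data 0
  simpa [next_non_nan, next_non_nan_alt, altCount] using h

-- ===== VERDICT (by name: the statement is the Claim_ definition above) =====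
theorem next_non_nan_spec : Claim_equal_next_non_nan := by
  intro index data _ _
  unfold Spec_next_non_nan
  exact ports_agree index data
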